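-- pv_equiv track=rewrite | github.com/MayankShah1/Algorithms-in-Python | 05-Array-Based-Sequences/Exercises/Project/P5-32.py | add_threed
-- ===== SOURCE A (Python) =====
-- def add_threed(dataset1, dataset2):
--     """Add two three dimensional datasets componentwise"""
--     if len(dataset1) != len(dataset2):
--         raise ValueError('Dimensions must agree')
--     resultant = []
--     for i in range(len(dataset1)):
--         if len(dataset1[i]) != len(dataset2[i]):
--             raise ValueError('Dimensions must agree')
--         outer = []
--         for j in range(len(dataset1[i])):
--             if len(dataset1[i][j]) != len(dataset2[i][j]):
--                 raise ValueError('Dimensions must agree')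
--             inner = []
--             for k in range(len(dataset1[i][j])):
--                 inner.append(dataset1[i][j][k] + dataset2[i][j][k])
--             outer.append(inner)
--         resultant.append(outer)
--     return resultant
-- ===== SOURCE B (Python) =====
-- def _add_rec(a, b, depth):
--     """Recursively add two nested datasets, recursing depth levels down."""
--     if depth == 0:
--         return a + b
--     if len(a) != len(b):
--         raise ValueError('Dimensions must agree')
--     return [_add_rec(x, y, depth - 1) for x, y in zip(a, b)]
--
--
-- def add_threed(dataset1, dataset2):
--     """Add two three dimensional datasets componentwise"""
--     return _add_rec(dataset1, dataset2, 3)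
-- ===== Notes on version B (the rewrite author's own statement) =====
-- stated objective: simpler
-- what changed: Replaces the three hard-coded nested index loops with a single recursive helper parameterised by depth that checks the lengths at each level and recurses down three levels, adding at the leaves.
import Mathlib
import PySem

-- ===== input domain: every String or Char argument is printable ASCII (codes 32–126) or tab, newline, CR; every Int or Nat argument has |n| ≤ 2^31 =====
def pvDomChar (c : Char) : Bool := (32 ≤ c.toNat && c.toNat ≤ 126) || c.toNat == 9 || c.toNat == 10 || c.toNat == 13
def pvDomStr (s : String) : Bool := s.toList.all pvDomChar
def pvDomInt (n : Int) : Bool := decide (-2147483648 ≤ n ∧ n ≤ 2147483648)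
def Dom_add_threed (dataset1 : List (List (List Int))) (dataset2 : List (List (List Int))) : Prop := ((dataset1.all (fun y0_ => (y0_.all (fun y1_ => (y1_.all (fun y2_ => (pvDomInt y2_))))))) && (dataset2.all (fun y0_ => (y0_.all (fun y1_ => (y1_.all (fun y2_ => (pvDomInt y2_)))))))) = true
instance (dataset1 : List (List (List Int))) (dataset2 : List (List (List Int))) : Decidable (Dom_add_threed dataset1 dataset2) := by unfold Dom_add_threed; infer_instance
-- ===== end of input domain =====

-- B replaces the three hard-coded nested index loops by one recursive helper parameterised by
-- depth; equivalence is claimed on Pre_ (matching shapes), exactly where Python A returns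
-- instead of raising ValueError.

-- ===== PORT A =====
-- Literal transliteration of A's three index-driven loops; a 'raise' inside a loop is modeled by
-- skipping the append / returning [] — those inputs are excluded by Pre_add_threed.
def add_threed (dataset1 : List (List (List Int))) (dataset2 : List (List (List Int))) : List (List (List Int)) :=
  if dataset1.length ≠ dataset2.length then []   -- raise ValueError
  else
    (PySem.List.pyRange 0 (dataset1.length : Int) 1).foldl (fun resultant i =>
      let a := PySem.List.pyGetD dataset1 i []
      let b := PySem.List.pyGetD dataset2 i []
      if a.length ≠ b.length then resultant      -- raise ValueError
      else
        resultant ++ [(PySem.List.pyRange 0 (a.length : Int) 1).foldl (fun outer j =>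
          let x := PySem.List.pyGetD a j []
          let y := PySem.List.pyGetD b j []
          if x.length ≠ y.length then outer      -- raise ValueError
          else
            outer ++ [(PySem.List.pyRange 0 (x.length : Int) 1).foldl (fun inner k =>
              inner ++ [PySem.List.pyGetD x k 0 + PySem.List.pyGetD y k 0]) []]) []]) []

-- ===== PORT B =====
-- Port of _add_rec: Python's depth-indexed recursion cannot be typed directly in Lean (the element
-- type changes with depth), so the depth>0 case is one polymorphic level combinator addRecLevel
-- (length check, then the zip comprehension recursing one level down), and _add_rec(…, 3) with the
-- depth-0 leaf case 'a + b' is its threefold nesting around Int addition.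
def addRecLevel {α : Type} (rec : α → α → α) (a : List α) (b : List α) : List α :=
  if a.length ≠ b.length then []                 -- raise ValueError
  else List.zipWith rec a b

def add_threed_alt (dataset1 : List (List (List Int))) (dataset2 : List (List (List Int))) : List (List (List Int)) :=
  addRecLevel (addRecLevel (addRecLevel (fun x y => x + y))) dataset1 dataset2

-- ===== PRECONDITION & SPEC =====
-- Pre_: exactly the inputs where A returns (all three levels of lengths agree); elsewhere A raises ValueError.
def Pre_add_threed (dataset1 : List (List (List Int))) (dataset2 : List (List (List Int))) : Prop :=
  dataset1.length = dataset2.length ∧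
  ∀ p ∈ dataset1.zip dataset2, p.1.length = p.2.length ∧
    ∀ q ∈ p.1.zip p.2, q.1.length = q.2.length
instance (dataset1 : List (List (List Int))) (dataset2 : List (List (List Int))) : Decidable (Pre_add_threed dataset1 dataset2) := by unfold Pre_add_threed; infer_instance

def pvWitness_add_threed : List (List (List Int)) × List (List (List Int)) :=
  ([[[1, 2], [3]], [[4]]], [[[10, 20], [30]], [[40]]])

def Spec_add_threed (dataset1 : List (List (List Int))) (dataset2 : List (List (List Int))) (out : List (List (List Int))) : Prop := out = add_threed_alt dataset1 dataset2
instance (dataset1 : List (List (List Int))) (dataset2 : List (List (List Int))) (out : List (List (List Int))) : Decidable (Spec_add_threed dataset1 dataset2 out) := by unfold Spec_add_threed; infer_instance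

-- ===== CLAIM (what is proved, stated in full; the proofs are below) =====
def Claim_equal_add_threed : Prop := ∀ (dataset1 : List (List (List Int))) (dataset2 : List (List (List Int))), Dom_add_threed dataset1 dataset2 → Pre_add_threed dataset1 dataset2 → Spec_add_threed dataset1 dataset2 (add_threed dataset1 dataset2)

-- ===== LEMMAS AND PROOFS =====

-- An index loop 'map i ↦ f xs[i] ys[i] over range(len xs)' is zipWith, when the lengths agree.
theorem pv_map_pyRange_zipWith {α β γ : Type} (f : α → β → γ) (xs : List α) (ys : List β)
    (dx : α) (dy : β) (h : xs.length = ys.length) :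
    (PySem.List.pyRange 0 (xs.length : Int) 1).map
      (fun i => f (PySem.List.pyGetD xs i dx) (PySem.List.pyGetD ys i dy)) = List.zipWith f xs ys := by
  apply List.ext_getElem
  · simp [h]
  · intro k h1 h2
    have hk : k < xs.length := by simp at h2; omega
    have hk' : k < ys.length := h ▸ hk
    simp [PySem.List.getElem_pyRange_one, PySem.List.pyGetD_natCast,
      List.getD_eq_getElem?_getD, List.getElem?_eq_getElem hk, List.getElem?_eq_getElem hk']

-- The pair of i-th elements is in the zip.
theorem pv_getD_mem_zip {α β : Type} (xs : List α) (ys : List β) (dx : α) (dy : β)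
    (h : xs.length = ys.length) (i : Int) (hi : i ∈ PySem.List.pyRange 0 (xs.length : Int) 1) :
    (PySem.List.pyGetD xs i dx, PySem.List.pyGetD ys i dy) ∈ xs.zip ys := by
  rw [PySem.List.mem_pyRange_one] at hi
  have hk : i.toNat < xs.length := by omega
  have hk' : i.toNat < ys.length := by omega
  have hz : i.toNat < (xs.zip ys).length := by simp; omega
  have := List.getElem_mem hz
  rwa [List.getElem_zip, ← PySem.List.pyGetD_eq_getElem xs dx hi.1 (by omega),
    ← PySem.List.pyGetD_eq_getElem ys dy hi.1 (by omega)] at this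

-- A's guarded append loop over range(len xs), with the guard false on every zipped pair, is zipWith.
theorem pv_fold_if_zipWith {α β γ : Type} (f : α → β → γ) (c : α → β → Prop)
    [inst : ∀ a b, Decidable (c a b)] (xs : List α) (ys : List β) (dx : α) (dy : β)
    (h : xs.length = ys.length) (hc : ∀ q ∈ xs.zip ys, ¬ c q.1 q.2) :
    (PySem.List.pyRange 0 (xs.length : Int) 1).foldl
      (fun acc i => if c (PySem.List.pyGetD xs i dx) (PySem.List.pyGetD ys i dy) then acc
        else acc ++ [f (PySem.List.pyGetD xs i dx) (PySem.List.pyGetD ys i dy)]) [] =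
    List.zipWith f xs ys := by
  rw [PySem.List.foldl_congr_mem _ _
      (fun acc i => acc ++ [f (PySem.List.pyGetD xs i dx) (PySem.List.pyGetD ys i dy)]) _
      (fun acc i hi => if_neg (hc _ (pv_getD_mem_zip xs ys dx dy h i hi)))]
  rw [PySem.List.foldl_append_singleton_eq_map]
  simpa using pv_map_pyRange_zipWith f xs ys dx dy h

-- zipWith congruence on zipped pairs.
theorem pv_zipWith_congr {α β γ : Type} (f g : α → β → γ) : ∀ (xs : List α) (ys : List β),
    (∀ q ∈ xs.zip ys, f q.1 q.2 = g q.1 q.2) → List.zipWith f xs ys = List.zipWith g xs ys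
  | [], _, _ => by simp
  | _ :: _, [], _ => by simp
  | x :: xs, y :: ys, h => by
    simp only [List.zipWith_cons_cons, h (x, y) (by simp)]
    exact congrArg _ (pv_zipWith_congr f g xs ys (fun q hq => h q (by simp [hq])))

theorem add_threed_spec_aux (dataset1 dataset2 : List (List (List Int)))
    (hpre : Pre_add_threed dataset1 dataset2) :
    add_threed dataset1 dataset2 = add_threed_alt dataset1 dataset2 := by
  obtain ⟨h0, h1⟩ := hpre
  unfold add_threed add_threed_alt addRecLevel
  rw [if_neg (by simp [h0]), if_neg (by simp [h0])]
  rw [pv_fold_if_zipWith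
      (f := fun a b => (PySem.List.pyRange 0 (a.length : Int) 1).foldl (fun outer j =>
        if (PySem.List.pyGetD a j []).length ≠ (PySem.List.pyGetD b j []).length then outer
        else outer ++ [(PySem.List.pyRange 0 ((PySem.List.pyGetD a j []).length : Int) 1).foldl
          (fun inner k => inner ++ [PySem.List.pyGetD (PySem.List.pyGetD a j []) k 0 +
            PySem.List.pyGetD (PySem.List.pyGetD b j []) k 0]) []]) [])
      (c := fun a b => a.length ≠ b.length) dataset1 dataset2 [] [] h0
      (fun q hq => by simpa using (h1 q hq).1)]
  apply pv_zipWith_congr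
  intro p hp
  rw [pv_fold_if_zipWith
      (f := fun x y => (PySem.List.pyRange 0 (x.length : Int) 1).foldl
        (fun inner k => inner ++ [PySem.List.pyGetD x k 0 + PySem.List.pyGetD y k 0]) [])
      (c := fun x y => x.length ≠ y.length) p.1 p.2 [] [] (h1 p hp).1
      (fun q hq => by simpa using (h1 p hp).2 q hq)]
  rw [if_neg (by simp [(h1 p hp).1])]
  apply pv_zipWith_congr
  intro q hq
  rw [PySem.List.foldl_append_singleton_eq_map]
  rw [if_neg (by simp [(h1 p hp).2 q hq])]
  simpa using pv_map_pyRange_zipWith (fun x y => x + y) q.1 q.2 0 0 ((h1 p hp).2 q hq)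

-- ===== VERDICT (by name: the statement is the Claim_ definition above) =====
theorem add_threed_spec : Claim_equal_add_threed := by
  intro d1 d2 _ hpre
  exact add_threed_spec_aux d1 d2 hpre
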